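-- pv_equiv track=rewrite | github.com/janmichael88/Leetcode_Monthly_Challenges | 2023_Challenges/May_2023.py | compress_col_wise
-- ===== SOURCE A (Python) =====
-- from typing import List
--
-- def compress_col_wise(matrix: List[List[int]]):
--     values = []
--     row_index = []
--     col_index = [0]
--
--     for col in range(len(matrix[0])):
--         for row in range(len(matrix)):
--             if matrix[row][col]:
--                 values.append(matrix[row][col])
--                 row_index.append(row)
--         col_index.append(len(values))
--
--     return values, row_index, col_index
-- ===== SOURCE B (Python) =====
-- from typing import List
--
-- def compress_col_wise(matrix: List[List[int]]):
--     n_cols = len(matrix[0])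
--     # first pass: row-major scan, one bucket of (row, value) pairs per column
--     buckets = [[] for _ in range(n_cols)]
--     for r, row in enumerate(matrix):
--         for c in range(n_cols):
--             v = row[c]
--             if v:
--                 buckets[c].append((r, v))
--     # second pass: flatten the buckets in column order
--     values = []
--     row_index = []
--     col_index = [0]
--     for bucket in buckets:
--         for r, v in bucket:
--             values.append(v)
--             row_index.append(r)
--         col_index.append(len(values))
--     return values, row_index, col_index
-- ===== Notes on version B (the rewrite author's own statement) =====
-- stated objective: alternative
-- what changed: Replaces A's single column-major double index loop with a two-pass bucket build: a row-major scan appends (row, value) pairs into one bucket per column, then a second pass flattens the buckets in column order into the three CSC lists.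
import Mathlib
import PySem

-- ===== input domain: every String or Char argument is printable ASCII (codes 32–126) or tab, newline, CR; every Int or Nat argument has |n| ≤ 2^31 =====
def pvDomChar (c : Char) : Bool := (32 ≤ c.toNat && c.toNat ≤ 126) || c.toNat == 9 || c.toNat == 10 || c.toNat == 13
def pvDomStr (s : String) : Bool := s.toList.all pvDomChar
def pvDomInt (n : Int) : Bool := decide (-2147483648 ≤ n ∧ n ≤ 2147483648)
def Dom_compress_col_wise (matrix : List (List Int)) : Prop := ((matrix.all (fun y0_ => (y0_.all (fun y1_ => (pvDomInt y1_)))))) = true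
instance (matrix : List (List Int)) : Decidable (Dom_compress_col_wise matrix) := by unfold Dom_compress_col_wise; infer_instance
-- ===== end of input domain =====

-- B replaces A's column-major index loops with a row-major bucket pass (one (row,value) bucket per
-- column) followed by a flatten pass over the buckets; same CSC triple, equivalence of return values.

-- ===== PORT A =====
def compress_col_wise (matrix : List (List Int)) : List Int × List Int × List Int :=
  (PySem.List.pyRange 0 (((PySem.List.pyGet? matrix 0).getD []).length : Int) 1).foldl
    (fun st col =>
      let st2 := (PySem.List.pyRange 0 (matrix.length : Int) 1).foldl
        (fun st2 row =>
          let v := PySem.List.pyGetD (PySem.List.pyGetD matrix row []) col 0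
          if v ≠ 0 then (st2.1 ++ [v], st2.2.1 ++ [row], st2.2.2) else st2) st
      (st2.1, st2.2.1, st2.2.2 ++ [(st2.1.length : Int)]))
    ([], [], [0])

-- ===== PORT B =====
def compress_col_wise_alt (matrix : List (List Int)) : List Int × List Int × List Int :=
  let nCols := ((PySem.List.pyGet? matrix 0).getD []).length
  let buckets : List (List (Int × Int)) :=
    (PySem.List.enumerate matrix 0).foldl
      (fun bks p =>
        (PySem.List.pyRange 0 (nCols : Int) 1).foldl
          (fun bks c =>
            let v := PySem.List.pyGetD p.2 c 0
            if v ≠ 0 then bks.set c.toNat (bks.getD c.toNat [] ++ [(p.1, v)]) else bks)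
          bks)
      (List.replicate nCols [])
  buckets.foldl
    (fun st bucket =>
      let st2 := bucket.foldl (fun st2 rv => (st2.1 ++ [rv.2], st2.2.1 ++ [rv.1], st2.2.2)) st
      (st2.1, st2.2.1, st2.2.2 ++ [(st2.1.length : Int)]))
    ([], [], [0])

-- ===== PRECONDITION & SPEC =====
-- Pre_ excludes exactly the inputs on which A raises IndexError (B raises there too): the empty
-- matrix (matrix[0]) and matrices containing a row shorter than the first row (matrix[row][col]).
def Pre_compress_col_wise (matrix : List (List Int)) : Prop :=
  matrix ≠ [] ∧ ∀ row ∈ matrix, (matrix.headD []).length ≤ row.length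
instance (matrix : List (List Int)) : Decidable (Pre_compress_col_wise matrix) := by
  unfold Pre_compress_col_wise; infer_instance
def pvWitness_compress_col_wise : List (List Int) := [[1, 0, 2], [0, 3, 0]]

def Spec_compress_col_wise (matrix : List (List Int)) (out : List Int × List Int × List Int) : Prop := out = compress_col_wise_alt matrix
instance (matrix : List (List Int)) (out : List Int × List Int × List Int) : Decidable (Spec_compress_col_wise matrix out) := by unfold Spec_compress_col_wise; infer_instance

-- ===== CLAIM (what is proved, stated in full; the proofs are below) =====
def Claim_equal_compress_col_wise : Prop := ∀ (matrix : List (List Int)), Dom_compress_col_wise matrix → Pre_compress_col_wise matrix → Spec_compress_col_wise matrix (compress_col_wise matrix)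

-- ===== LEMMAS AND PROOFS =====

-- the nonzero (row, value) pairs of column c, in row order, of an enumerated row list
def pvColP (l : List (Int × List Int)) (c : Nat) : List (Int × Int) :=
  l.filterMap (fun p => if p.2.getD c 0 ≠ 0 then some (p.1, p.2.getD c 0) else none)

-- B's flatten step over one bucket, in closed form
lemma pvEmitStep (bucket : List (Int × Int)) :
    ∀ st : List Int × List Int × List Int,
    bucket.foldl (fun st2 rv => (st2.1 ++ [rv.2], st2.2.1 ++ [rv.1], st2.2.2)) st
      = (st.1 ++ bucket.map (·.2), st.2.1 ++ bucket.map (·.1), st.2.2) := by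
  induction bucket with
  | nil => simp
  | cons x xs ih => intro st; simp [ih]

-- an index loop 'for i in range(len(xs)): … xs[i] …' is a fold over enumerate
lemma pvFoldIdx {β : Type} (g : β → Int → List Int → β) :
    ∀ (xs pre : List (List Int)) (init : β),
    (PySem.List.pyRange (pre.length : Int) ((pre.length : Int) + (xs.length : Int)) 1).foldl
        (fun b i => g b i (PySem.List.pyGetD (pre ++ xs) i [])) init
      = (PySem.List.enumerate xs (pre.length : Int)).foldl (fun b p => g b p.1 p.2) init := by
  intro xs
  induction xs with
  | nil => intro pre init; simp [PySem.List.pyRange_one_eq_nil, PySem.List.enumerate_nil]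
  | cons x xs ih =>
    intro pre init
    rw [PySem.List.pyRange_one_cons (by push_cast [List.length_cons]; omega),
      PySem.List.enumerate_cons]
    simp only [List.foldl_cons]
    have h1 : PySem.List.pyGetD (pre ++ x :: xs) (pre.length : Int) [] = x := by
      rw [PySem.List.pyGetD_natCast]
      simp [List.getD]
    rw [h1]
    have h2 := ih (pre ++ [x]) (g init (pre.length : Int) x)
    simp only [List.length_append, List.length_cons, List.length_nil, List.append_assoc,
      List.singleton_append, Nat.cast_add, Nat.cast_one, zero_add] at h2
    rw [← h2]
    congr 2
    push_cast [List.length_cons]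
    ring

-- A's inner row loop (as a fold over the enumerated rows), in closed form
lemma pvInnerA (c : Nat) (l : List (Int × List Int)) :
    ∀ st : List Int × List Int × List Int,
    l.foldl (fun st2 p =>
        let v := PySem.List.pyGetD p.2 (c : Int) 0
        if v ≠ 0 then (st2.1 ++ [v], st2.2.1 ++ [p.1], st2.2.2) else st2) st
      = (st.1 ++ (pvColP l c).map (·.2), st.2.1 ++ (pvColP l c).map (·.1), st.2.2) := by
  induction l with
  | nil => simp [pvColP]
  | cons p l ih =>
    intro st
    simp only [List.foldl_cons, ih]
    have hc : PySem.List.pyGetD p.2 (c : Int) 0 = p.2.getD c 0 := PySem.List.pyGetD_natCast _ _ _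
    by_cases h : p.2[c]?.getD 0 = 0 <;>
      simp [pvColP, hc, List.getD, h]

-- B's inner column loop for one row, over List.range: which buckets it touches, pointwise
lemma pvRowFold (r : Int) (row : List Int) :
    ∀ (n : Nat) (bks : List (List (Int × Int))), n ≤ bks.length →
    (((List.range n).foldl
        (fun bks c =>
          if row.getD c 0 ≠ 0 then bks.set c (bks.getD c [] ++ [(r, row.getD c 0)]) else bks)
        bks).length = bks.length) ∧
    ∀ c : Nat,
      ((List.range n).foldl
        (fun bks c =>
          if row.getD c 0 ≠ 0 then bks.set c (bks.getD c [] ++ [(r, row.getD c 0)]) else bks)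
        bks).getD c []
      = if c < n then
          (if row.getD c 0 ≠ 0 then bks.getD c [] ++ [(r, row.getD c 0)] else bks.getD c [])
        else bks.getD c [] := by
  intro n
  induction n with
  | zero => intro bks _; exact ⟨rfl, fun c => by simp⟩
  | succ n ih =>
    intro bks hlen
    obtain ⟨ihlen, ihget⟩ := ih bks (by omega)
    rw [List.range_succ]
    simp only [List.foldl_append, List.foldl_cons, List.foldl_nil]
    set mid := (List.range n).foldl
        (fun bks c =>
          if row.getD c 0 ≠ 0 then bks.set c (bks.getD c [] ++ [(r, row.getD c 0)]) else bks)
        bks with hmid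
    have hnlt : n < mid.length := by rw [ihlen]; omega
    have hmidn : mid.getD n [] = bks.getD n [] := by
      rw [ihget n, if_neg (show ¬ n < n from by omega)]
    have hsetlen : ∀ x : List (Int × Int), (mid.set n x).length = mid.length := by simp
    have hset_self : ∀ x : List (Int × Int), (mid.set n x).getD n [] = x := fun x => by
      simp [List.getD_eq_getElem?_getD, hnlt]
    have hset_ne : ∀ (x : List (Int × Int)) (c : Nat), c ≠ n →
        (mid.set n x).getD c [] = mid.getD c [] := fun x c hc => by
      simp [List.getD_eq_getElem?_getD,
        List.getElem?_set_ne (show n ≠ c from fun h => hc h.symm)]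
    by_cases h : row.getD n 0 = 0
    · rw [if_neg (not_not_intro h)]
      refine ⟨ihlen, fun c => ?_⟩
      rw [ihget c]
      by_cases hc : c = n
      · rw [hc, if_neg (show ¬ n < n from by omega),
          if_pos (show n < n + 1 from by omega), if_neg (not_not_intro h)]
      · by_cases h2 : c < n
        · rw [if_pos h2, if_pos (show c < n + 1 from by omega)]
        · rw [if_neg h2, if_neg (show ¬ c < n + 1 from by omega)]
    · rw [if_pos h]
      refine ⟨by rw [hsetlen, ihlen], fun c => ?_⟩
      by_cases hc : c = n
      · rw [hc, hset_self, hmidn, if_pos (show n < n + 1 from by omega), if_pos h]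
      · rw [hset_ne _ _ hc, ihget c]
        by_cases h2 : c < n
        · rw [if_pos h2, if_pos (show c < n + 1 from by omega)]
        · rw [if_neg h2, if_neg (show ¬ c < n + 1 from by omega)]

-- B's first pass: bucket c accumulates exactly the column-c pairs
lemma pvFirstPass (n : Nat) :
    ∀ (l : List (Int × List Int)) (bks : List (List (Int × Int))), bks.length = n →
    ((l.foldl
        (fun bks p =>
          (PySem.List.pyRange 0 (n : Int) 1).foldl
            (fun bks c =>
              let v := PySem.List.pyGetD p.2 c 0
              if v ≠ 0 then bks.set c.toNat (bks.getD c.toNat [] ++ [(p.1, v)]) else bks)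
            bks)
        bks).length = n) ∧
    ∀ c : Nat, c < n →
      (l.foldl
        (fun bks p =>
          (PySem.List.pyRange 0 (n : Int) 1).foldl
            (fun bks c =>
              let v := PySem.List.pyGetD p.2 c 0
              if v ≠ 0 then bks.set c.toNat (bks.getD c.toNat [] ++ [(p.1, v)]) else bks)
            bks)
        bks).getD c []
      = bks.getD c [] ++ pvColP l c := by
  intro l
  induction l with
  | nil => intro bks hlen; exact ⟨hlen, fun c _ => by simp [pvColP]⟩
  | cons p l ih =>
    intro bks hlen
    simp only [List.foldl_cons]
    have hconv : (PySem.List.pyRange 0 (n : Int) 1).foldl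
        (fun bks c =>
          let v := PySem.List.pyGetD p.2 c 0
          if v ≠ 0 then bks.set c.toNat (bks.getD c.toNat [] ++ [(p.1, v)]) else bks)
        bks
      = (List.range n).foldl
        (fun bks c =>
          if p.2.getD c 0 ≠ 0 then bks.set c (bks.getD c [] ++ [(p.1, p.2.getD c 0)]) else bks)
        bks := by
      rw [PySem.List.pyRange_one 0 (n : Int)]
      simp only [Int.sub_zero, Int.toNat_natCast, zero_add]
      rw [List.foldl_map]
      refine List.foldl_ext _ _ _ ?_
      intro b c _
      rw [PySem.List.pyGetD_natCast]
      simp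
    rw [hconv]
    obtain ⟨hrl, hrg⟩ := pvRowFold p.1 p.2 n bks (by omega)
    obtain ⟨ihlen, ihget⟩ := ih _ (by rw [hrl, hlen])
    refine ⟨ihlen, fun c hc => ?_⟩
    rw [ihget c hc, hrg c, if_pos hc]
    simp only [pvColP, List.filterMap_cons]
    by_cases h : p.2.getD c 0 = 0
    · simp [List.getD] at h ⊢
      simp [h]
    · simp only [List.getD] at h ⊢
      simp [h]

-- the common per-column step both programs compute
def pvG (matrix : List (List Int)) (st : List Int × List Int × List Int) (c : Nat) :
    List Int × List Int × List Int :=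
  (st.1 ++ (pvColP (PySem.List.enumerate matrix 0) c).map (·.2),
   st.2.1 ++ (pvColP (PySem.List.enumerate matrix 0) c).map (·.1),
   st.2.2 ++ [((st.1 ++ (pvColP (PySem.List.enumerate matrix 0) c).map (·.2)).length : Int)])

-- A's column step in closed form
lemma pvStepA (matrix : List (List Int)) (c : Nat) (st : List Int × List Int × List Int) :
    ((PySem.List.pyRange 0 (matrix.length : Int) 1).foldl
      (fun st2 row =>
        let v := PySem.List.pyGetD (PySem.List.pyGetD matrix row []) (c : Int) 0
        if v ≠ 0 then (st2.1 ++ [v], st2.2.1 ++ [row], st2.2.2) else st2) st)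
    = (st.1 ++ (pvColP (PySem.List.enumerate matrix 0) c).map (·.2),
       st.2.1 ++ (pvColP (PySem.List.enumerate matrix 0) c).map (·.1), st.2.2) := by
  have h1 := pvFoldIdx (fun st2 i row =>
      let v := PySem.List.pyGetD row (c : Int) 0
      if v ≠ 0 then (st2.1 ++ [v], st2.2.1 ++ [i], st2.2.2) else st2) matrix [] st
  simp only [List.length_nil, Nat.cast_zero, zero_add, List.nil_append] at h1
  exact h1.trans (pvInnerA c (PySem.List.enumerate matrix 0) st)

-- ===== VERDICT (by name: the statement is the Claim_ definition above) =====
theorem compress_col_wise_spec : Claim_equal_compress_col_wise := by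
  intro matrix _ hpre
  obtain ⟨hne, _⟩ := hpre
  unfold Spec_compress_col_wise
  obtain ⟨m0, ms, rfl⟩ : ∃ a l, matrix = a :: l := by
    cases matrix with
    | nil => exact absurd rfl hne
    | cons a l => exact ⟨a, l, rfl⟩
  have hget : (PySem.List.pyGet? (m0 :: ms) 0).getD [] = m0 := by
    rw [show (0 : Int) = ((0 : Nat) : Int) from rfl, PySem.List.pyGet?_natCast]
    rfl
  have hA : compress_col_wise (m0 :: ms)
      = (List.range m0.length).foldl (pvG (m0 :: ms)) ([], [], [0]) := by
    unfold compress_col_wise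
    rw [hget, PySem.List.pyRange_one 0 (m0.length : Int)]
    simp only [Int.sub_zero, Int.toNat_natCast, zero_add]
    rw [List.foldl_map]
    refine List.foldl_ext _ _ _ ?_
    intro st c _
    simp only [pvStepA, pvG]
  have hbuckets :
      ((PySem.List.enumerate (m0 :: ms) 0).foldl
        (fun bks p =>
          (PySem.List.pyRange 0 (m0.length : Int) 1).foldl
            (fun bks c =>
              let v := PySem.List.pyGetD p.2 c 0
              if v ≠ 0 then bks.set c.toNat (bks.getD c.toNat [] ++ [(p.1, v)]) else bks)
            bks)
        (List.replicate m0.length []))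
      = (List.range m0.length).map (fun c => pvColP (PySem.List.enumerate (m0 :: ms) 0) c) := by
    obtain ⟨hl, hg⟩ := pvFirstPass m0.length (PySem.List.enumerate (m0 :: ms) 0)
      (List.replicate m0.length []) (by simp)
    apply List.ext_getElem (by rw [hl]; simp)
    intro c h1 h2
    have hc : c < m0.length := hl ▸ h1
    rw [← List.getD_eq_getElem _ [] h1, hg c hc]
    simp
  have hB : compress_col_wise_alt (m0 :: ms)
      = (List.range m0.length).foldl (pvG (m0 :: ms)) ([], [], [0]) := by
    unfold compress_col_wise_alt
    simp only [hget]
    rw [hbuckets, List.foldl_map]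
    refine List.foldl_ext _ _ _ ?_
    intro st c _
    simp only [pvEmitStep, pvG]
  rw [hA, hB]
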